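-- pv_equiv track=rewrite | github.com/ptr-yudai/ptrlib | ptrlib/crypto/number/root.py | rootrem
-- ===== SOURCE A (Python) =====
-- from typing import Tuple
--
-- def rootrem(y: int, n: int) -> Tuple[int, int]:
--     """ Calculate reminder n-th root.
--
--     $x=trunc(y^(1/n)), r=y-x^n$
--
--     Args:
--         y (int): y of `rootrem[n]{y}`
--         n (int): n of `rootrem[n]{y}`
--
--     Returns:
--         tuple: (x, r) where x is the n-th root of y and r is the remainder.
--
--     Raises:
--         ValueError: Cannot calculate the root.
--     """
--     if n == 0:
--         raise ValueError("Zeroth root provided to rootrem")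
--
--     # TODO: Support negative argument with odd root
--     if y < 0 or n < 0:
--         raise ValueError("Negative argument provided to rootrem.")
--
--     if abs(y) <= 1:
--         # If y is 1, 0, or -1
--         return y, 0
--
--     u = 0
--     t = 1 << (y.bit_length() // n + 1)
--     if n == 1:
--         # Who would use this?
--         u = y
--     elif n == 2:
--         # Simplify sqrt loop
--         while True:
--             u, t = t, u
--             t = (y // u + u) // 2
--             if abs(t) >= abs(u):
--                 break
--     else:
--         # n != 2
--         if n < 0:
--             t = -t
--
--         while True:
--             u, t = t, u
--             t = (y // pow(u, n-1) + u*(n-1)) // n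
--             if abs(t) >= abs(u):
--                 break
--
--     return u, y - u**n
-- ===== SOURCE B (Python) =====
-- from typing import Tuple
--
-- def rootrem(y: int, n: int) -> Tuple[int, int]:
--     """Integer n-th root with remainder, by binary search."""
--     if n == 0:
--         raise ValueError("Zeroth root provided to rootrem")
--     if y < 0 or n < 0:
--         raise ValueError("Negative argument provided to rootrem.")
--     if abs(y) <= 1:
--         return y, 0
--     lo = 0
--     hi = 1 << (y.bit_length() // n + 1)
--     # invariant: lo**n <= y < hi**n
--     while hi - lo > 1:
--         mid = (lo + hi) // 2
--         if mid ** n <= y: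
--             lo = mid
--         else:
--             hi = mid
--     return lo, y - lo ** n
-- ===== Notes on version B (the rewrite author's own statement) =====
-- stated objective: alternative
-- what changed: Replaces A's Newton iteration (with separate n==1/n==2/general loops) by a single binary search over [0, 2^(bitlen(y)//n+1)) for the largest x with x**n <= y; guard clauses and early returns kept.
import Mathlib
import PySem

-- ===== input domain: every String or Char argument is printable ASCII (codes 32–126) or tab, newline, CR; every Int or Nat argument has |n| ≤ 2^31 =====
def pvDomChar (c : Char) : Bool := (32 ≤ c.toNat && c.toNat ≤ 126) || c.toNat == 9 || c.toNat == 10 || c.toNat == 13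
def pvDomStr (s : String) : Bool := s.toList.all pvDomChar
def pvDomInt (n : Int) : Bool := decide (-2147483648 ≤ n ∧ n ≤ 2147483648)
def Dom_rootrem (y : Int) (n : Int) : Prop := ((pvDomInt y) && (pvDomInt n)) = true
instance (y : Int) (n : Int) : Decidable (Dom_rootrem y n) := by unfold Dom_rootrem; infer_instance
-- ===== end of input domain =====

-- B replaces A's three Newton-iteration branches by one binary search for the largest x
-- with x^n ≤ y (alternative algorithm, same guard clauses and early returns).

-- ===== PORT A =====
-- one Newton step of A's general loop: t = (y // pow(u, n-1) + u*(n-1)) // n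
def newtonStep (y : Int) (n : Int) (u : Int) : Int :=
  PySem.Int.floordiv (PySem.Int.floordiv y (u ^ (n - 1).toNat) + u * (n - 1)) n

-- A's general while-loop; after 'u, t = t, u' the state is just the incoming t.
-- fuel only makes the recursion structural: |t| strictly decreases, so fuel = |t|+1 never runs out.
def loopN (y : Int) (n : Int) (fuel : Nat) (t : Int) : Int :=
  match fuel with
  | 0 => t
  | fuel + 1 =>
    let t' := newtonStep y n t
    if t.natAbs ≤ t'.natAbs then t else loopN y n fuel t'

-- A's simplified sqrt loop, same fuel discipline
def loop2 (y : Int) (fuel : Nat) (t : Int) : Int :=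
  match fuel with
  | 0 => t
  | fuel + 1 =>
    let t' := PySem.Int.floordiv (PySem.Int.floordiv y t + t) 2
    if t.natAbs ≤ t'.natAbs then t else loop2 y fuel t'

def rootrem (y : Int) (n : Int) : Int × Int :=
  if n = 0 then (0, 0)           -- Python: raise ValueError (outside Pre_)
  else if y < 0 ∨ n < 0 then (0, 0)  -- Python: raise ValueError (outside Pre_)
  else if y.natAbs ≤ 1 then (y, 0)
  else
    -- t = 1 << (y.bit_length() // n + 1); here y ≥ 2 and n ≥ 1
    let t : Int := 2 ^ (PySem.Int.bitLength y / n.toNat + 1)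
    if n = 1 then (y, y - y ^ (1 : Nat))
    else if n = 2 then
      let u := loop2 y (t.natAbs + 1) t
      (u, y - u ^ (2 : Nat))
    else
      let t := if n < 0 then -t else t  -- dead inside Pre_ (n ≥ 3 here)
      let u := loopN y n (t.natAbs + 1) t
      (u, y - u ^ n.toNat)

-- ===== PORT B =====
-- binary search for the largest x with x^n ≤ y, maintaining lo^n ≤ y < hi^n;
-- the interval shrinks every round, so fuel = (hi-lo).toNat never runs out
def bsearch (y : Int) (n : Int) (fuel : Nat) (lo : Int) (hi : Int) : Int :=
  match fuel with
  | 0 => lo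
  | fuel + 1 =>
    if hi - lo ≤ 1 then lo
    else
      let mid := PySem.Int.floordiv (lo + hi) 2
      if mid ^ n.toNat ≤ y then bsearch y n fuel mid hi
      else bsearch y n fuel lo mid

def rootrem_alt (y : Int) (n : Int) : Int × Int :=
  if n = 0 then (0, 0)
  else if y < 0 ∨ n < 0 then (0, 0)
  else if y.natAbs ≤ 1 then (y, 0)
  else
    let hi : Int := 2 ^ (PySem.Int.bitLength y / n.toNat + 1)
    let x := bsearch y n hi.toNat 0 hi
    (x, y - x ^ n.toNat)

-- ===== PRECONDITION & SPEC =====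
-- A raises ValueError iff n = 0 or y < 0 or n < 0; Pre_ is exactly the inputs where A returns.
def Pre_rootrem (y : Int) (n : Int) : Prop := 0 ≤ y ∧ 1 ≤ n
instance (y : Int) (n : Int) : Decidable (Pre_rootrem y n) := by unfold Pre_rootrem; infer_instance
def pvWitness_rootrem : Int × Int := (8, 3)

def Spec_rootrem (y : Int) (n : Int) (out : Int × Int) : Prop := out = rootrem_alt y n
instance (y : Int) (n : Int) (out : Int × Int) : Decidable (Spec_rootrem y n out) := by unfold Spec_rootrem; infer_instance

-- ===== CLAIM (what is proved, stated in full; the proofs are below) =====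
def Claim_equal_rootrem : Prop := ∀ (y : Int) (n : Int), Dom_rootrem y n → Pre_rootrem y n → Spec_rootrem y n (rootrem y n)

-- ===== LEMMAS AND PROOFS =====

theorem bsearch_char (y n : Int) :
    ∀ (N : Nat) (lo hi : Int), (hi - lo).toNat ≤ N → 0 ≤ lo → lo < hi →
      lo ^ n.toNat ≤ y → y < hi ^ n.toNat →
      0 ≤ bsearch y n N lo hi ∧ (bsearch y n N lo hi) ^ n.toNat ≤ y ∧
        y < (bsearch y n N lo hi + 1) ^ n.toNat := by
  intro N
  induction N with
  | zero => intro lo hi h1 _ h3 _ _; omega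
  | succ N ih =>
    intro lo hi hN h0 hlt hlo hhi
    rw [bsearch]
    by_cases h1 : hi - lo ≤ 1
    · have hhi1 : hi = lo + 1 := by omega
      subst hhi1
      simp only [if_pos h1]
      exact ⟨h0, hlo, hhi⟩
    · simp only [if_neg h1]
      have hm1 : lo + 1 ≤ PySem.Int.floordiv (lo + hi) 2 :=
        (PySem.Int.le_floordiv_iff_mul_le (by omega)).2 (by omega)
      have hm2 : PySem.Int.floordiv (lo + hi) 2 < hi :=
        (PySem.Int.floordiv_lt_iff_lt_mul (by omega)).2 (by omega)
      by_cases hc : (PySem.Int.floordiv (lo + hi) 2) ^ n.toNat ≤ y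
      · simp only [if_pos hc]
        exact ih _ hi (by omega) (by omega) (by omega) hc hhi
      · simp only [if_neg hc]
        exact ih lo _ (by omega) h0 (by omega) hlo (by omega)

-- weighted AM–GM: (m+1)·x·u^m ≤ x^(m+1) + m·u^(m+1) for 0 ≤ x, 0 ≤ u
theorem amgm (m : Nat) (x u : Int) (hx : 0 ≤ x) (hu : 0 ≤ u) :
    ((m : Int) + 1) * x * u ^ m ≤ x ^ (m + 1) + (m : Int) * u ^ (m + 1) := by
  induction m with
  | zero => simp
  | succ k ih =>
    have hre : x * u ^ (k + 1) + x ^ (k + 1) * u ≤ x ^ (k + 2) + u ^ (k + 2) := by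
      rcases le_total x u with h | h
      · have key := mul_nonneg (sub_nonneg.2 h) (sub_nonneg.2 (pow_le_pow_left₀ hx h (k + 1)))
        have expand : (u - x) * (u ^ (k + 1) - x ^ (k + 1))
            = x ^ (k + 2) + u ^ (k + 2) - (x * u ^ (k + 1) + x ^ (k + 1) * u) := by ring
        rw [expand] at key; linarith
      · have key := mul_nonneg (sub_nonneg.2 h) (sub_nonneg.2 (pow_le_pow_left₀ hu h (k + 1)))
        have expand : (x - u) * (x ^ (k + 1) - u ^ (k + 1))
            = x ^ (k + 2) + u ^ (k + 2) - (x * u ^ (k + 1) + x ^ (k + 1) * u) := by ring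
        rw [expand] at key; linarith
    have ihu := mul_le_mul_of_nonneg_right ih hu
    have e1 : ((k : Int) + 1) * x * u ^ k * u = ((k : Int) + 1) * x * u ^ (k + 1) := by ring
    have e2 : (x ^ (k + 1) + (k : Int) * u ^ (k + 1)) * u
        = x ^ (k + 1) * u + (k : Int) * u ^ (k + 2) := by ring
    rw [e1, e2] at ihu
    push_cast
    have e3 : x ^ (k + 1 + 1) = x ^ (k + 2) := by ring
    have e4 : u ^ (k + 1 + 1) = u ^ (k + 2) := by ring
    rw [e3, e4]
    linarith

-- lower bound: one Newton step never falls below any x with x^n ≤ y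
theorem newtonStep_ge (y n x u : Int) (hn : 2 ≤ n) (hu : 1 ≤ u) (hx : 0 ≤ x)
    (hxy : x ^ n.toNat ≤ y) : x ≤ newtonStep y n u := by
  unfold newtonStep
  have hp : (0:Int) < u ^ (n - 1).toNat := pow_pos (by omega) _
  rw [PySem.Int.le_floordiv_iff_mul_le (by omega : (0:Int) < n)]
  have h2 : x * n - u * (n - 1) ≤ PySem.Int.floordiv y (u ^ (n - 1).toNat) := by
    rw [PySem.Int.le_floordiv_iff_mul_le hp]
    have hnt : n.toNat = (n - 1).toNat + 1 := by omega
    rw [hnt] at hxy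
    have ha := amgm (n - 1).toNat x u hx (by omega)
    have hn' : ((n - 1).toNat : Int) = n - 1 := Int.toNat_of_nonneg (by omega)
    rw [hn'] at ha
    rw [pow_succ] at ha hxy
    ring_nf at ha hxy ⊢
    linarith
  linarith

-- descent: while u overshoots, the step strictly decreases
theorem newtonStep_lt (y n u : Int) (hn : 2 ≤ n) (hu : 1 ≤ u)
    (hy : y < u ^ n.toNat) : newtonStep y n u < u := by
  unfold newtonStep
  have hp : (0:Int) < u ^ (n - 1).toNat := pow_pos (by omega) _
  rw [PySem.Int.floordiv_lt_iff_lt_mul (by omega : (0:Int) < n)]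
  have h2 : PySem.Int.floordiv y (u ^ (n - 1).toNat) < u := by
    rw [PySem.Int.floordiv_lt_iff_lt_mul hp]
    have hnt : n.toNat = (n - 1).toNat + 1 := by omega
    rw [hnt, pow_succ] at hy
    linarith
  ring_nf
  ring_nf at h2
  linarith

theorem loopN_char (y n r : Int) (hn : 2 ≤ n) (hr1 : 1 ≤ r)
    (hr : r ^ n.toNat ≤ y) (hr' : y < (r + 1) ^ n.toNat) :
    ∀ (N : Nat) (t : Int), t.natAbs < N → r ≤ t → loopN y n N t = r := by
  intro N
  induction N with
  | zero => intro t h1 h2; omega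
  | succ N ih =>
    intro t hN hrt
    rw [loopN]
    have hge : r ≤ newtonStep y n t := newtonStep_ge y n r t hn (by omega) (by omega) hr
    by_cases hc : t.natAbs ≤ (newtonStep y n t).natAbs
    · simp only [if_pos hc]
      by_contra hne
      have htr : r + 1 ≤ t := by omega
      have hpow : (r + 1) ^ n.toNat ≤ t ^ n.toNat := pow_le_pow_left₀ (by omega) htr _
      have hlt := newtonStep_lt y n t hn (by omega) (by omega)
      omega
    · simp only [if_neg hc]
      exact ih _ (by omega) hge

theorem loop2_eq_loopN (y : Int) :
    ∀ (N : Nat) (t : Int), loop2 y N t = loopN y 2 N t := by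
  have hb : ∀ u : Int, newtonStep y 2 u
      = PySem.Int.floordiv (PySem.Int.floordiv y u + u) 2 := by
    intro u; norm_num [newtonStep]
  intro N
  induction N with
  | zero => intro t; rw [loop2, loopN]
  | succ N ih =>
    intro t
    rw [loop2, loopN, hb]
    by_cases hc : t.natAbs ≤ (PySem.Int.floordiv (PySem.Int.floordiv y t + t) 2).natAbs
    · simp only [if_pos hc]
    · simp only [if_neg hc]
      exact ih _

-- any x with x^m ≤ y < (x+1)^m and x below the start value is what loopN returns
theorem root_le_start {y x t0 : Int} {m : Nat} (ht0 : 0 ≤ t0)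
    (hxle : x ^ m ≤ y) (hbound : y < t0 ^ m) : x ≤ t0 := by
  by_contra hh
  have : t0 ^ m ≤ x ^ m := pow_le_pow_left₀ ht0 (by omega) m
  omega

theorem rootrem_main (y n : Int) (hy : 0 ≤ y) (hn : 1 ≤ n) :
    rootrem y n = rootrem_alt y n := by
  have hn0 : ¬ (n = 0) := by omega
  have hneg : ¬ (y < 0 ∨ n < 0) := by omega
  by_cases hy1 : y.natAbs ≤ 1
  · simp [rootrem, rootrem_alt, hn0, hneg, hy1]
  · have hy2 : 2 ≤ y := by omega
    have hm1 : 1 ≤ n.toNat := by omega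
    have ht00 : (0:Int) < 2 ^ (PySem.Int.bitLength y / n.toNat + 1) := pow_pos (by omega) _
    -- y is below the n-th power of the common start value
    have hbound : y < ((2:Int) ^ (PySem.Int.bitLength y / n.toNat + 1)) ^ n.toNat := by
      have h1 : y.natAbs < 2 ^ PySem.Int.bitLength y := PySem.Int.lt_two_pow_bitLength y
      have h2 : PySem.Int.bitLength y < (PySem.Int.bitLength y / n.toNat + 1) * n.toNat := by
        rw [Nat.add_mul, one_mul]
        exact Nat.lt_div_mul_add hm1
      have h3 : (2:Nat) ^ PySem.Int.bitLength y
          ≤ 2 ^ ((PySem.Int.bitLength y / n.toNat + 1) * n.toNat) :=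
        Nat.pow_le_pow_right (by omega) (by omega)
      have h4 : ((2:Int) ^ (PySem.Int.bitLength y / n.toNat + 1)) ^ n.toNat
          = ((2 ^ ((PySem.Int.bitLength y / n.toNat + 1) * n.toNat) : Nat) : Int) := by
        push_cast
        rw [← pow_mul]
      rw [h4]
      calc y = (y.natAbs : Int) := by omega
        _ < ((2 ^ PySem.Int.bitLength y : Nat) : Int) := by exact_mod_cast h1
        _ ≤ _ := by exact_mod_cast h3
    -- the bisection result and its characterisation
    obtain ⟨hx0, hxle, hxlt⟩ :=
      bsearch_char y n ((2:Int) ^ (PySem.Int.bitLength y / n.toNat + 1)).toNat 0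
        ((2:Int) ^ (PySem.Int.bitLength y / n.toNat + 1)) (by omega) le_rfl ht00
        (by rw [zero_pow (by omega)]; exact hy) hbound
    have hx1 : 1 ≤ bsearch y n ((2:Int) ^ (PySem.Int.bitLength y / n.toNat + 1)).toNat 0 ((2:Int) ^ (PySem.Int.bitLength y / n.toNat + 1)) := by
      rcases Int.lt_or_le (bsearch y n ((2:Int) ^ (PySem.Int.bitLength y / n.toNat + 1)).toNat 0 ((2:Int) ^ (PySem.Int.bitLength y / n.toNat + 1))) 1
        with h | h
      · have hx0' : bsearch y n ((2:Int) ^ (PySem.Int.bitLength y / n.toNat + 1)).toNat 0 ((2:Int) ^ (PySem.Int.bitLength y / n.toNat + 1)) = 0 := by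
          omega
        rw [hx0'] at hxlt
        simp at hxlt
        omega
      · exact h
    have hrt := root_le_start (by omega) hxle hbound
    have hyneg : ¬ (y < 0) := by omega
    by_cases h1 : n = 1
    · subst h1
      have hx : bsearch y 1 ((2:Int) ^ (PySem.Int.bitLength y + 1)).toNat 0
          ((2:Int) ^ (PySem.Int.bitLength y + 1)) = y := by
        norm_num at hxle hxlt
        omega
      simp [rootrem, rootrem_alt, hyneg, hy1, hx]
    · by_cases h2 : n = 2
      · subst h2
        have hl2 := loop2_eq_loopN y
          (((2:Int) ^ (PySem.Int.bitLength y / (2:Int).toNat + 1)).natAbs + 1)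
          ((2:Int) ^ (PySem.Int.bitLength y / (2:Int).toNat + 1))
        have hu := loopN_char y 2 _ (by omega) hx1 hxle hxlt
          (((2:Int) ^ (PySem.Int.bitLength y / (2:Int).toNat + 1)).natAbs + 1)
          ((2:Int) ^ (PySem.Int.bitLength y / (2:Int).toNat + 1)) (by omega) hrt
        simp only [show (2:Int).toNat = 2 from rfl, Int.natAbs_pow, show (2:Int).natAbs = 2 from rfl] at hl2 hu
        simp [rootrem, rootrem_alt, hyneg, hy1, hl2, hu]
      · have h3 : ¬ (n < 0) := by omega
        have hu := loopN_char y n _ (by omega) hx1 hxle hxlt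
          (((2:Int) ^ (PySem.Int.bitLength y / n.toNat + 1)).natAbs + 1)
          ((2:Int) ^ (PySem.Int.bitLength y / n.toNat + 1)) (by omega) hrt
        simp only [Int.natAbs_pow, show (2:Int).natAbs = 2 from rfl] at hu
        simp [rootrem, rootrem_alt, hn0, hyneg, hy1, h1, h2, h3, hu]

-- ===== VERDICT (by name: the statement is the Claim_ definition above) =====
theorem rootrem_spec : Claim_equal_rootrem := by
  intro y n _ hpre
  exact rootrem_main y n hpre.1 hpre.2
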